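-- pv_equiv track=rewrite | github.com/siddharthbc/CSR-graph-coloring | picasso/sw_via_east_check.py | _ungated_receivers
-- ===== SOURCE A (Python) =====
-- from typing import Dict, List, Set, Tuple
--
-- def _ungated_receivers(spe: int, num_cols: int, num_rows: int,
--                        emits_east_flag: bool,
--                        emits_south_flag: bool) -> Set[int]:
--     """Stream-specific 2d_seg2 transport simulation (no gates).
--
--     Provenance tracked: e2s_relay only fires from east arrivals;
--     back_relay only fires from south arrivals; back arrivals do
--     NOT trigger e2s. Mirrors the rx-task wiring in
--     csl/pe_program_lww_2d_seg2.csl.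
--     """
--     sr = spe // num_cols
--     sc = spe % num_cols
--     last_col = num_cols - 1
--     east_seen: Set[int] = set()
--     south_seen: Set[int] = set()
--     back_seen: Set[int] = set()
--     if emits_east_flag:
--         for c in range(sc, num_cols):
--             east_seen.add(sr * num_cols + c)
--     if emits_south_flag:
--         for r in range(sr, num_rows):
--             south_seen.add(r * num_cols + sc)
--     changed = True
--     while changed:
--         changed = False
--         for pe in list(east_seen):
--             r = pe // num_cols
--             c = pe % num_cols
--             if c == 0:
--                 continue
--             for rp in range(r, num_rows):
--                 npe = rp * num_cols + c
--                 if npe not in south_seen: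
--                     south_seen.add(npe)
--                     changed = True
--         for pe in list(south_seen):
--             r = pe // num_cols
--             c = pe % num_cols
--             if r == 0 or c != last_col:
--                 continue
--             for cp in range(0, last_col):
--                 npe = r * num_cols + cp
--                 if npe not in back_seen:
--                     back_seen.add(npe)
--                     changed = True
--     return east_seen | south_seen | back_seen
-- ===== SOURCE B (Python) =====
-- def _ungated_receivers(spe: int, num_cols: int, num_rows: int,
--                        emits_east_flag: bool,
--                        emits_south_flag: bool):
--     """Closed form: the relay fixpoint converges after a single sweep, so the
--     three reached sets can be written down directly (no worklist loop)."""
--     sr, sc = divmod(spe, num_cols)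
--     last_col = num_cols - 1
--     rows = range(sr, num_rows)
--     east = {sr * num_cols + c for c in range(sc, num_cols)} if emits_east_flag else set()
--     cols = ([sc] if emits_south_flag else []) + \
--            ([c for c in range(sc, num_cols) if c != 0] if emits_east_flag else [])
--     south = {r * num_cols + c for c in cols for r in rows}
--     if last_col in cols:
--         back = {r * num_cols + cp for r in rows if r != 0 for cp in range(0, last_col)}
--     else:
--         back = set()
--     return east | south | back
-- ===== Notes on version B (the rewrite author's own statement) =====
-- stated objective: simpler
-- what changed: B replaces A's worklist fixpoint (while-changed loop with membership-tested insertions) by a closed-form construction: the relay converges after one sweep, so the east row, the set of flooded columns, the south set and the wrap-back set are written down directly as comprehensions.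
import Mathlib
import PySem

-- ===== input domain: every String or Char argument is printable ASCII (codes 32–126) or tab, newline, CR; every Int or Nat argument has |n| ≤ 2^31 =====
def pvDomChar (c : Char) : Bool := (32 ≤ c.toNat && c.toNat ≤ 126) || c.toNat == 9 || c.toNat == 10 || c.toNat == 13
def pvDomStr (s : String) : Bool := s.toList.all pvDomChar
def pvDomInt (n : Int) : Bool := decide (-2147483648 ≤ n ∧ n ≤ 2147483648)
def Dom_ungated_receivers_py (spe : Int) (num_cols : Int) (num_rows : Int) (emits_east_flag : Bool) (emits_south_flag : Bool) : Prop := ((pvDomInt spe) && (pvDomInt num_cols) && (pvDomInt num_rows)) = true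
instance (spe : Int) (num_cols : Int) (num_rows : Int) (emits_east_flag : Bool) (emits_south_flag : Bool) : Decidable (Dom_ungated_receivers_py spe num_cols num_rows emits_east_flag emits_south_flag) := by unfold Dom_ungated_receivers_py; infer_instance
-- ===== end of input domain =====

-- B replaces A's while-changed fixpoint by the closed-form reached sets (the relay converges
-- after a single sweep); equivalence is about the returned set's element list.

-- ===== PORT A =====
-- `if npe not in S: S.add(npe); changed = True`
def pvA_innerAdd (p : PySem.Set Int × Bool) (npe : Int) : PySem.Set Int × Bool :=
  if p.1.contains npe then p else (PySem.Set.add p.1 npe, true)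

-- `for pe in list(east_seen): ...` (e2s relay; iterated in the set's insertion order —
-- the resulting sets do not depend on the iteration order)
def pvA_eastPass (num_cols num_rows : Int) (east : List Int) (acc : PySem.Set Int × Bool) : PySem.Set Int × Bool :=
  east.foldl (fun acc pe =>
    let r := PySem.Int.floordiv pe num_cols
    let c := PySem.Int.mod pe num_cols
    if c == 0 then acc
    else (PySem.List.pyRange r num_rows 1).foldl (fun a rp => pvA_innerAdd a (rp * num_cols + c)) acc) acc

-- `for pe in list(south_seen): ...` (back relay)
def pvA_southPass (num_cols last_col : Int) (south : List Int) (acc : PySem.Set Int × Bool) : PySem.Set Int × Bool :=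
  south.foldl (fun acc pe =>
    let r := PySem.Int.floordiv pe num_cols
    let c := PySem.Int.mod pe num_cols
    if r == 0 || c != last_col then acc
    else (PySem.List.pyRange 0 last_col 1).foldl (fun a cp => pvA_innerAdd a (r * num_cols + cp)) acc) acc

-- `while changed:` — fuel 2 is exact: back arrivals feed nothing, so the second sweep of the
-- Python loop never inserts (proved as part of the equivalence below) and the loop stops.
def pvA_loop (num_cols num_rows last_col : Int) (east : PySem.Set Int) :
    Nat → PySem.Set Int × PySem.Set Int → PySem.Set Int × PySem.Set Int
  | 0, st => st
  | fuel+1, (south, back) =>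
    let p1 := pvA_eastPass num_cols num_rows east (south, false)
    let p2 := pvA_southPass num_cols last_col p1.1 (back, p1.2)
    if p2.2 then pvA_loop num_cols num_rows last_col east fuel (p1.1, p2.1)
    else (p1.1, p2.1)

def ungated_receivers_py (spe : Int) (num_cols : Int) (num_rows : Int) (emits_east_flag : Bool) (emits_south_flag : Bool) : List Int :=
  let sr := PySem.Int.floordiv spe num_cols
  let sc := PySem.Int.mod spe num_cols
  let last_col := num_cols - 1
  let east : PySem.Set Int := if emits_east_flag then
      (PySem.List.pyRange sc num_cols 1).foldl (fun s c => PySem.Set.add s (sr * num_cols + c)) PySem.Set.empty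
    else PySem.Set.empty
  let south : PySem.Set Int := if emits_south_flag then
      (PySem.List.pyRange sr num_rows 1).foldl (fun s r => PySem.Set.add s (r * num_cols + sc)) PySem.Set.empty
    else PySem.Set.empty
  let st := pvA_loop num_cols num_rows last_col east 2 (south, PySem.Set.empty)
  PySem.Set.union (PySem.Set.union east st.1) st.2

-- ===== PORT B =====
def ungated_receivers_py_alt (spe : Int) (num_cols : Int) (num_rows : Int) (emits_east_flag : Bool) (emits_south_flag : Bool) : List Int :=
  let sr := PySem.Int.floordiv spe num_cols
  let sc := PySem.Int.mod spe num_cols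
  let last_col := num_cols - 1
  -- `rows = range(sr, num_rows)` is a lazy range object in Python; it is inlined at its use sites
  let east : PySem.Set Int := if emits_east_flag then
      PySem.Set.ofList ((PySem.List.pyRange sc num_cols 1).map (fun c => sr * num_cols + c))
    else PySem.Set.empty
  let cols : List Int := (if emits_south_flag then [sc] else [])
      ++ (if emits_east_flag then (PySem.List.pyRange sc num_cols 1).filter (fun c => c != 0) else [])
  let south : PySem.Set Int := PySem.Set.ofList
      (cols.flatMap (fun c => (PySem.List.pyRange sr num_rows 1).map (fun r => r * num_cols + c)))
  let back : PySem.Set Int := if cols.contains last_col then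
      PySem.Set.ofList (((PySem.List.pyRange sr num_rows 1).filter (fun r => r != 0)).flatMap
        (fun r => (PySem.List.pyRange 0 last_col 1).map (fun cp => r * num_cols + cp)))
    else PySem.Set.empty
  PySem.Set.union (PySem.Set.union east south) back

-- ===== PRECONDITION & SPEC =====
-- Python raises ZeroDivisionError on spe // 0 in both A and B; num_cols = 0 is excluded.
def Pre_ungated_receivers_py (spe : Int) (num_cols : Int) (num_rows : Int) (emits_east_flag : Bool) (emits_south_flag : Bool) : Prop := num_cols ≠ 0
instance (spe : Int) (num_cols : Int) (num_rows : Int) (emits_east_flag : Bool) (emits_south_flag : Bool) : Decidable (Pre_ungated_receivers_py spe num_cols num_rows emits_east_flag emits_south_flag) := by unfold Pre_ungated_receivers_py; infer_instance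
def pvWitness_ungated_receivers_py : Int × Int × Int × Bool × Bool := (3, 3, 3, true, true)

def Spec_ungated_receivers_py (spe : Int) (num_cols : Int) (num_rows : Int) (emits_east_flag : Bool) (emits_south_flag : Bool) (out : List Int) : Prop := out = ungated_receivers_py_alt spe num_cols num_rows emits_east_flag emits_south_flag
instance (spe : Int) (num_cols : Int) (num_rows : Int) (emits_east_flag : Bool) (emits_south_flag : Bool) (out : List Int) : Decidable (Spec_ungated_receivers_py spe num_cols num_rows emits_east_flag emits_south_flag out) := by unfold Spec_ungated_receivers_py; infer_instance

-- ===== CLAIM (what is proved, stated in full; the proofs are below) =====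
def Claim_equal_ungated_receivers_py : Prop := ∀ (spe : Int) (num_cols : Int) (num_rows : Int) (emits_east_flag : Bool) (emits_south_flag : Bool), Dom_ungated_receivers_py spe num_cols num_rows emits_east_flag emits_south_flag → Pre_ungated_receivers_py spe num_cols num_rows emits_east_flag emits_south_flag → Spec_ungated_receivers_py spe num_cols num_rows emits_east_flag emits_south_flag (ungated_receivers_py spe num_cols num_rows emits_east_flag emits_south_flag)

-- ===== LEMMAS AND PROOFS =====

-- `mod`/`floordiv` decode a PE number r*nc+c back to (r, c) when c is a legal column value.

lemma pv_mod_decode_pos (b r c : Int) (hb : 0 < b) (h0 : 0 ≤ c) (h1 : c < b) :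
    PySem.Int.mod (r * b + c) b = c := by
  rw [PySem.Int.mod_eq_emod_of_pos hb]
  have e : r * b + c = c + b * r := by ring
  rw [e, Int.add_mul_emod_self_left, Int.emod_eq_of_lt h0 h1]

lemma pv_div_decode_pos (b r c : Int) (hb : 0 < b) (h0 : 0 ≤ c) (h1 : c < b) :
    PySem.Int.floordiv (r * b + c) b = r := by
  rw [PySem.Int.floordiv_eq_ediv_of_pos hb]
  have e : r * b + c = c + b * r := by ring
  rw [e, Int.add_mul_ediv_left _ _ (by omega : b ≠ 0), Int.ediv_eq_zero_of_lt h0 h1]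
  omega

def pvInCol (nc c : Int) : Prop := (0 < nc ∧ 0 ≤ c ∧ c < nc) ∨ (nc < 0 ∧ nc < c ∧ c ≤ 0)

lemma pv_mod_decode (nc r c : Int) (h : pvInCol nc c) : PySem.Int.mod (r * nc + c) nc = c := by
  rcases h with ⟨h1, h2, h3⟩ | ⟨h1, h2, h3⟩
  · exact pv_mod_decode_pos nc r c h1 h2 h3
  · have e : r * nc + c = -(r * (-nc) + (-c)) := by ring
    have hm := PySem.Int.mod_neg_neg (r * (-nc) + (-c)) (-nc)
    simp only [neg_neg] at hm
    rw [e, hm, pv_mod_decode_pos (-nc) r (-c) (by omega) (by omega) (by omega)]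
    ring

lemma pv_div_decode (nc r c : Int) (h : pvInCol nc c) : PySem.Int.floordiv (r * nc + c) nc = r := by
  rcases h with ⟨h1, h2, h3⟩ | ⟨h1, h2, h3⟩
  · exact pv_div_decode_pos nc r c h1 h2 h3
  · have e : r * nc + c = -(r * (-nc) + (-c)) := by ring
    have hm := PySem.Int.floordiv_neg_neg (r * (-nc) + (-c)) (-nc)
    simp only [neg_neg] at hm
    rw [e, hm, pv_div_decode_pos (-nc) r (-c) (by omega) (by omega) (by omega)]

-- generated element lists of the two relay passes
def pvEGen (nc nr pe : Int) : List Int :=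
  if PySem.Int.mod pe nc == 0 then []
  else (PySem.List.pyRange (PySem.Int.floordiv pe nc) nr 1).map (fun rp => rp * nc + PySem.Int.mod pe nc)

def pvSGen (nc last_col pe : Int) : List Int :=
  if PySem.Int.floordiv pe nc == 0 || PySem.Int.mod pe nc != last_col then []
  else (PySem.List.pyRange 0 last_col 1).map (fun cp => PySem.Int.floordiv pe nc * nc + cp)

lemma pv_inner_fst (g : Int → Int) (ys : List Int) (acc : PySem.Set Int × Bool) :
    (ys.foldl (fun a y => pvA_innerAdd a (g y)) acc).1 = PySem.Set.update acc.1 (ys.map g) := by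
  induction ys generalizing acc with
  | nil => rfl
  | cons y ys ih =>
    simp only [List.foldl_cons, List.map_cons, PySem.Set.update, ih]
    congr 1
    simp only [pvA_innerAdd, PySem.Set.add]
    split <;> rfl

lemma pv_inner_noop (g : Int → Int) (ys : List Int) (acc : PySem.Set Int × Bool)
    (h : ∀ y ∈ ys, g y ∈ acc.1) :
    ys.foldl (fun a y => pvA_innerAdd a (g y)) acc = acc := by
  induction ys generalizing acc with
  | nil => rfl
  | cons y ys ih =>
    have hc : acc.1.contains (g y) = true := (PySem.Set.contains_iff _ _).mpr (h y (by simp))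
    simp only [List.foldl_cons, pvA_innerAdd, hc, if_pos]
    exact ih acc (fun y hy => h y (by simp [hy]))

lemma pv_update_noop (s : PySem.Set Int) (l : List Int) (h : ∀ x ∈ l, x ∈ s) :
    PySem.Set.update s l = s := by
  induction l generalizing s with
  | nil => rfl
  | cons x l ih =>
    have hc : s.contains x = true := (PySem.Set.contains_iff _ _).mpr (h x (by simp))
    simp only [PySem.Set.update, List.foldl_cons, PySem.Set.add, hc, if_pos]
    exact ih s (fun y hy => h y (by simp [hy]))

lemma pv_mem_update (s : PySem.Set Int) (l : List Int) (x : Int) :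
    x ∈ PySem.Set.update s l ↔ x ∈ s ∨ x ∈ l := by
  induction l generalizing s with
  | nil => simp [PySem.Set.update]
  | cons y l ih =>
    simp only [PySem.Set.update, List.foldl_cons] at *
    rw [ih]
    simp [PySem.Set.mem_add]
    tauto

lemma pv_update_append (s : PySem.Set Int) (l1 l2 : List Int) :
    PySem.Set.update s (l1 ++ l2) = PySem.Set.update (PySem.Set.update s l1) l2 := by
  simp [PySem.Set.update, List.foldl_append]

lemma pv_eastPass_fst (nc nr : Int) (east : List Int) (acc : PySem.Set Int × Bool) :
    (pvA_eastPass nc nr east acc).1 = PySem.Set.update acc.1 (east.flatMap (pvEGen nc nr)) := by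
  induction east generalizing acc with
  | nil => rfl
  | cons pe east ih =>
    have hstep : pvA_eastPass nc nr (pe :: east) acc = pvA_eastPass nc nr east
        (if PySem.Int.mod pe nc == 0 then acc
         else (PySem.List.pyRange (PySem.Int.floordiv pe nc) nr 1).foldl
            (fun a rp => pvA_innerAdd a (rp * nc + PySem.Int.mod pe nc)) acc) := rfl
    rw [hstep, ih, List.flatMap_cons, pv_update_append]
    congr 1
    by_cases h : PySem.Int.mod pe nc = 0
    · simp [pvEGen, h, PySem.Set.update]
    · rw [if_neg (by simpa using h)]
      rw [pv_inner_fst]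
      simp [pvEGen, h]

lemma pv_eastPass_noop (nc nr : Int) (east : List Int) (acc : PySem.Set Int × Bool)
    (h : ∀ x ∈ east.flatMap (pvEGen nc nr), x ∈ acc.1) :
    pvA_eastPass nc nr east acc = acc := by
  induction east generalizing acc with
  | nil => rfl
  | cons pe east ih =>
    have hstep : pvA_eastPass nc nr (pe :: east) acc = pvA_eastPass nc nr east
        (if PySem.Int.mod pe nc == 0 then acc
         else (PySem.List.pyRange (PySem.Int.floordiv pe nc) nr 1).foldl
            (fun a rp => pvA_innerAdd a (rp * nc + PySem.Int.mod pe nc)) acc) := rfl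
    rw [hstep]
    have hhead : ∀ x ∈ pvEGen nc nr pe, x ∈ acc.1 := fun x hx =>
      h x (by simp [List.mem_flatMap]; exact Or.inl hx)
    have htail : ∀ x ∈ east.flatMap (pvEGen nc nr), x ∈ acc.1 := fun x hx =>
      h x (by simp [List.mem_flatMap] at hx ⊢; tauto)
    by_cases hc : PySem.Int.mod pe nc = 0
    · rw [if_pos (by simpa using hc)]
      exact ih acc htail
    · rw [if_neg (by simpa using hc)]
      rw [pv_inner_noop _ _ _ (fun y hy => hhead _ (by
        unfold pvEGen
        rw [if_neg (by simpa using hc)]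
        exact List.mem_map.mpr ⟨y, hy, rfl⟩))]
      exact ih acc htail

lemma pv_southPass_fst (nc lc : Int) (south : List Int) (acc : PySem.Set Int × Bool) :
    (pvA_southPass nc lc south acc).1 = PySem.Set.update acc.1 (south.flatMap (pvSGen nc lc)) := by
  induction south generalizing acc with
  | nil => rfl
  | cons pe south ih =>
    have hstep : pvA_southPass nc lc (pe :: south) acc = pvA_southPass nc lc south
        (if PySem.Int.floordiv pe nc == 0 || PySem.Int.mod pe nc != lc then acc
         else (PySem.List.pyRange 0 lc 1).foldl
            (fun a cp => pvA_innerAdd a (PySem.Int.floordiv pe nc * nc + cp)) acc) := rfl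
    rw [hstep, ih, List.flatMap_cons, pv_update_append]
    congr 1
    by_cases h : PySem.Int.floordiv pe nc = 0 ∨ ¬ PySem.Int.mod pe nc = lc
    · rw [if_pos (by rcases h with h | h <;> simp [h])]
      have : pvSGen nc lc pe = [] := by
        unfold pvSGen
        rw [if_pos (by rcases h with h | h <;> simp [h])]
      simp [this, PySem.Set.update]
    · obtain ⟨h1, h2⟩ := not_or.mp h
      rw [not_not] at h2
      rw [if_neg (by simp [h1, h2])]
      rw [pv_inner_fst]
      unfold pvSGen
      rw [if_neg (by simp [h1, h2])]

lemma pv_southPass_noop (nc lc : Int) (south : List Int) (acc : PySem.Set Int × Bool)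
    (h : ∀ x ∈ south.flatMap (pvSGen nc lc), x ∈ acc.1) :
    pvA_southPass nc lc south acc = acc := by
  induction south generalizing acc with
  | nil => rfl
  | cons pe south ih =>
    have hstep : pvA_southPass nc lc (pe :: south) acc = pvA_southPass nc lc south
        (if PySem.Int.floordiv pe nc == 0 || PySem.Int.mod pe nc != lc then acc
         else (PySem.List.pyRange 0 lc 1).foldl
            (fun a cp => pvA_innerAdd a (PySem.Int.floordiv pe nc * nc + cp)) acc) := rfl
    rw [hstep]
    have hhead : ∀ x ∈ pvSGen nc lc pe, x ∈ acc.1 := fun x hx =>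
      h x (by simp [List.mem_flatMap]; exact Or.inl hx)
    have htail : ∀ x ∈ south.flatMap (pvSGen nc lc), x ∈ acc.1 := fun x hx =>
      h x (by simp [List.mem_flatMap] at hx ⊢; tauto)
    by_cases hc : PySem.Int.floordiv pe nc = 0 ∨ ¬ PySem.Int.mod pe nc = lc
    · rw [if_pos (by rcases hc with hc | hc <;> simp [hc])]
      exact ih acc htail
    · obtain ⟨h1, h2⟩ := not_or.mp hc
      rw [not_not] at h2
      rw [if_neg (by simp [h1, h2])]
      rw [pv_inner_noop _ _ _ (fun y hy => hhead _ (by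
        unfold pvSGen
        rw [if_neg (by simp [h1, h2])]
        exact List.mem_map.mpr ⟨y, hy, rfl⟩))]
      exact ih acc htail

lemma pv_foldl_add_filter (p : Int → Bool) (l : List Int) (s : PySem.Set Int) :
    (l.foldl PySem.Set.add s).filter p = (l.filter p).foldl PySem.Set.add (s.filter p) := by
  induction l generalizing s with
  | nil => rfl
  | cons x l ih =>
    by_cases hp : p x
    · simp only [List.filter_cons, hp, if_pos, List.foldl_cons]
      rw [ih]
      congr 1
      simp only [PySem.Set.add]
      by_cases hc : s.contains x = true
      · have hc2 : PySem.Set.contains (List.filter p s) x = true := by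
          rw [PySem.Set.contains_iff, List.mem_filter]
          exact ⟨by simpa using hc, hp⟩
        rw [if_pos hc, if_pos hc2]
      · have hc2 : ¬ PySem.Set.contains (List.filter p s) x = true := by
          rw [PySem.Set.contains_iff, List.mem_filter]
          intro hcon
          exact (by simpa using hc : x ∉ s) hcon.1
        rw [if_neg hc, if_neg hc2, List.filter_append]
        simp [hp]
    · have hpx : p x = false := by simpa using hp
      simp only [List.filter_cons, hpx, List.foldl_cons, Bool.false_eq_true, if_false]
      rw [ih]
      congr 1
      simp only [PySem.Set.add]
      split
      · rfl
      · rw [List.filter_append]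
        simp [hpx]

lemma pv_ofList_filter (p : Int → Bool) (l : List Int) :
    (PySem.Set.ofList l).filter p = PySem.Set.ofList (l.filter p) := by
  rw [PySem.Set.ofList_eq_foldl, PySem.Set.ofList_eq_foldl, pv_foldl_add_filter]
  rfl

lemma pv_flatMap_if_filter (p : Int → Bool) (g : Int → List Int) (l : List Int) :
    (l.flatMap (fun x => if p x then g x else [])) = (l.filter p).flatMap g := by
  induction l with
  | nil => rfl
  | cons x l ih =>
    by_cases hp : p x <;> simp [List.filter_cons, hp, ih]


-- column/row building blocks of the closed form
def pvColL (nc nr sr c : Int) : List Int := (PySem.List.pyRange sr nr 1).map (fun r => r * nc + c)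

def pvSG (nc nr sr sc : Int) (eE eS : Bool) : List Int :=
  (if eS then pvColL nc nr sr sc else [])
    ++ (if eE then (PySem.List.pyRange sc nc 1).flatMap (fun c => if c = 0 then [] else pvColL nc nr sr c) else [])

def pvRowsF (nr sr : Int) : List Int := (PySem.List.pyRange sr nr 1).filter (fun r => r != 0)

def pvBlockF (nc nr sr lc : Int) : List Int := (pvRowsF nr sr).map (fun r => r * nc + lc)

def pvBackL (nc nr sr lc : Int) : List Int :=
  (pvRowsF nr sr).flatMap (fun r => (PySem.List.pyRange 0 lc 1).map (fun cp => r * nc + cp))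

def pvQual (nc lc pe : Int) : Bool := !(PySem.Int.floordiv pe nc == 0 || PySem.Int.mod pe nc != lc)

def pvGB (nc lc pe : Int) : List Int :=
  (PySem.List.pyRange 0 lc 1).map (fun cp => PySem.Int.floordiv pe nc * nc + cp)

lemma pv_foldl_add_map (g : Int → Int) (l : List Int) (s : PySem.Set Int) :
    l.foldl (fun s x => PySem.Set.add s (g x)) s = PySem.Set.update s (l.map g) := by
  simp [PySem.Set.update, List.foldl_map]

lemma pv_ofList_update (l1 l2 : List Int) :
    PySem.Set.update (PySem.Set.ofList l1) l2 = PySem.Set.ofList (l1 ++ l2) := by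
  rw [PySem.Set.ofList_eq_foldl, PySem.Set.ofList_eq_foldl]
  simp [PySem.Set.update, List.foldl_append]

lemma pv_update_empty (l : List Int) : PySem.Set.update PySem.Set.empty l = PySem.Set.ofList l := by
  rw [PySem.Set.ofList_eq_foldl]; rfl

lemma pv_incol_mem (nc sc c : Int) (hsc : pvInCol nc sc) (hc : c ∈ PySem.List.pyRange sc nc 1) :
    pvInCol nc c := by
  rw [PySem.List.mem_pyRange_one] at hc
  rcases hsc with ⟨h1, h2, h3⟩ | ⟨h1, h2, h3⟩
  · exact Or.inl ⟨h1, by omega, by omega⟩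
  · exact absurd hc.2 (by omega)

lemma pv_east_list (nc sr sc : Int) :
    PySem.Set.ofList ((PySem.List.pyRange sc nc 1).map (fun c => sr * nc + c))
      = (PySem.List.pyRange sc nc 1).map (fun c => sr * nc + c) :=
  PySem.Set.ofList_eq_self_of_nodup _
    (((PySem.List.nodup_pyRange_one sc nc).map (fun a b h => by omega)))

lemma pv_flatMap_east (nc nr sr sc : Int) (hsc : pvInCol nc sc) :
    ((PySem.List.pyRange sc nc 1).map (fun c => sr * nc + c)).flatMap (pvEGen nc nr)
      = (PySem.List.pyRange sc nc 1).flatMap (fun c => if c = 0 then [] else pvColL nc nr sr c) := by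
  rw [List.flatMap_map]
  apply List.flatMap_congr
  intro c hc
  have h := pv_incol_mem nc sc c hsc hc
  show pvEGen nc nr (sr * nc + c) = _
  unfold pvEGen pvColL
  rw [pv_mod_decode nc sr c h, pv_div_decode nc sr c h]
  by_cases h0 : c = 0
  · simp [h0]
  · rw [if_neg (by simpa using h0), if_neg h0]

lemma pv_sgen_eq_if (nc lc pe : Int) :
    pvSGen nc lc pe = if pvQual nc lc pe then pvGB nc lc pe else [] := by
  unfold pvSGen pvQual pvGB
  cases hb : (PySem.Int.floordiv pe nc == 0 || PySem.Int.mod pe nc != lc) <;> simp [hb]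

lemma pv_flatMap_sgen (nc lc : Int) (l : List Int) :
    l.flatMap (pvSGen nc lc) = (l.filter (pvQual nc lc)).flatMap (pvGB nc lc) := by
  rw [← pv_flatMap_if_filter]
  exact List.flatMap_congr (fun x _ => pv_sgen_eq_if nc lc x)

lemma pv_filter_colL (nc nr sr lc c : Int) (h : pvInCol nc c) :
    (pvColL nc nr sr c).filter (pvQual nc lc) = if c = lc then pvBlockF nc nr sr lc else [] := by
  unfold pvColL pvBlockF pvRowsF
  rw [List.filter_map]
  have hpt : ∀ r ∈ PySem.List.pyRange sr nr 1,
      (pvQual nc lc ∘ fun r => r * nc + c) r = (decide (c = lc) && (r != 0)) := by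
    intro r _
    show pvQual nc lc (r * nc + c) = _
    unfold pvQual
    rw [pv_div_decode nc r c h, pv_mod_decode nc r c h]
    by_cases h1 : r = 0 <;> by_cases h2 : c = lc <;> simp [h1, h2, bne]
  rw [List.filter_congr hpt]
  by_cases h2 : c = lc
  · subst h2; simp
  · simp [h2]

lemma pv_flatMap_single (a : Int) (G : List Int) (l : List Int) (hl : l.Nodup) :
    l.flatMap (fun c => if c = a then G else []) = if a ∈ l then G else [] := by
  induction l with
  | nil => simp
  | cons x t ih =>
    rw [List.flatMap_cons]
    rcases List.nodup_cons.mp hl with ⟨hx, ht⟩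
    by_cases hxa : x = a
    · subst hxa
      rw [if_pos rfl, if_pos (List.mem_cons_self ..)]
      have hz : t.flatMap (fun c => if c = x then G else []) = [] := by
        rw [List.flatMap_eq_nil_iff]
        intro c hc
        have hne : c ≠ x := fun e => hx (e ▸ hc)
        rw [if_neg hne]
      rw [hz, List.append_nil]
    · rw [if_neg hxa, ih ht]
      by_cases ha : a ∈ t
      · rw [if_pos ha, if_pos (List.mem_cons_of_mem _ ha), List.nil_append]
      · have hax : ¬ a ∈ x :: t := by
          rw [List.mem_cons]
          rintro (e | e)
          · exact hxa e.symm
          · exact ha e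
        rw [if_neg ha, if_neg hax, List.nil_append]

lemma pv_blockF_nodup (nc nr sr lc : Int) (hnc : nc ≠ 0) : (pvBlockF nc nr sr lc).Nodup := by
  unfold pvBlockF pvRowsF
  refine List.Nodup.map ?_ ((PySem.List.nodup_pyRange_one sr nr).filter _)
  intro a b h
  have h2 : (a - b) * nc = 0 := by linear_combination h
  rcases mul_eq_zero.mp h2 with h3 | h3
  · omega
  · exact absurd h3 hnc

lemma pv_blockF_flatMap (nc nr sr lc : Int) (h : pvInCol nc lc) :
    (pvBlockF nc nr sr lc).flatMap (pvGB nc lc) = pvBackL nc nr sr lc := by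
  unfold pvBlockF pvBackL
  rw [List.flatMap_map]
  apply List.flatMap_congr
  intro r _
  show pvGB nc lc (r * nc + lc) = _
  unfold pvGB
  rw [pv_div_decode nc r lc h]

lemma pv_colsB_flatMap (nc nr sr sc : Int) (eE eS : Bool) :
    ((if eS then [sc] else []) ++ (if eE then (PySem.List.pyRange sc nc 1).filter (fun c => c != 0) else [])).flatMap
        (fun c => (PySem.List.pyRange sr nr 1).map (fun r => r * nc + c))
      = pvSG nc nr sr sc eE eS := by
  unfold pvSG
  rw [List.flatMap_append]
  congr 1
  · cases eS <;> simp [pvColL]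
  · cases eE
    · simp
    · simp only [if_pos]
      rw [← pv_flatMap_if_filter (fun c => c != 0)]
      apply List.flatMap_congr
      intro c _
      by_cases h0 : c = 0 <;> simp [h0, pvColL]

lemma pv_SG_filter (nc nr sr sc lc : Int) (hsc : pvInCol nc sc) (eE eS : Bool) :
    (pvSG nc nr sr sc eE eS).filter (pvQual nc lc)
      = (if eS then (if sc = lc then pvBlockF nc nr sr lc else []) else [])
        ++ (if eE then (if lc ∈ PySem.List.pyRange sc nc 1 ∧ lc ≠ 0 then pvBlockF nc nr sr lc else []) else []) := by
  unfold pvSG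
  rw [List.filter_append]
  congr 1
  · cases eS
    · simp
    · simp only [if_pos]
      exact pv_filter_colL nc nr sr lc sc hsc
  · cases eE
    · simp
    · simp only [if_pos]
      rw [List.filter_flatMap]
      have hpt : ∀ c ∈ PySem.List.pyRange sc nc 1,
          ((if c = 0 then [] else pvColL nc nr sr c).filter (pvQual nc lc))
            = (fun c => if c = lc then (if lc = 0 then [] else pvBlockF nc nr sr lc) else []) c := by
        intro c hc
        by_cases h0 : c = 0
        · subst h0
          show ((if (0:Int) = 0 then [] else pvColL nc nr sr 0).filter (pvQual nc lc))
              = if (0:Int) = lc then (if lc = 0 then [] else pvBlockF nc nr sr lc) else []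
          rw [if_pos rfl, List.filter_nil]
          by_cases hl : (0:Int) = lc
          · rw [if_pos hl, if_pos hl.symm]
          · rw [if_neg hl]
        · rw [if_neg h0, pv_filter_colL nc nr sr lc c (pv_incol_mem nc sc c hsc hc)]
          by_cases h2 : c = lc
          · subst h2
            rw [if_pos rfl]
            show pvBlockF nc nr sr c = if c = c then (if c = 0 then [] else pvBlockF nc nr sr c) else []
            rw [if_pos rfl, if_neg h0]
          · simp [h2]
      rw [List.flatMap_congr hpt,
        pv_flatMap_single lc _ _ (PySem.List.nodup_pyRange_one sc nc)]
      by_cases hm : lc ∈ PySem.List.pyRange sc nc 1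
      · by_cases hz : lc = 0
        · simp [hm, hz]
        · simp [hm, hz]
      · simp [hm]

lemma pv_loop2 (nc nr lc : Int) (east s0 : PySem.Set Int) :
    pvA_loop nc nr lc east 2 (s0, PySem.Set.empty) =
      (PySem.Set.update s0 (east.flatMap (pvEGen nc nr)),
       PySem.Set.update PySem.Set.empty
         ((PySem.Set.update s0 (east.flatMap (pvEGen nc nr))).flatMap (pvSGen nc lc))) := by
  have h1 := pv_eastPass_fst nc nr east (s0, false)
  set P1 := pvA_eastPass nc nr east (s0, false) with hP1
  set S1 := PySem.Set.update s0 (east.flatMap (pvEGen nc nr)) with hS1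
  have h2 := pv_southPass_fst nc lc P1.1 (PySem.Set.empty, P1.2)
  set P2 := pvA_southPass nc lc P1.1 (PySem.Set.empty, P1.2) with hP2
  set B1 := PySem.Set.update PySem.Set.empty (S1.flatMap (pvSGen nc lc)) with hB1
  have hmem1 : ∀ x ∈ east.flatMap (pvEGen nc nr), x ∈ S1 :=
    fun x hx => (pv_mem_update s0 _ x).mpr (Or.inr hx)
  have hmem2 : ∀ x ∈ S1.flatMap (pvSGen nc lc), x ∈ B1 :=
    fun x hx => (pv_mem_update PySem.Set.empty _ x).mpr (Or.inr hx)
  have hb2 : P2.1 = B1 := by rw [h2, hB1, h1]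
  have hloop1 : pvA_loop nc nr lc east 1 (S1, B1) = (S1, B1) := by
    show (let p1 := pvA_eastPass nc nr east (S1, false);
          let p2 := pvA_southPass nc lc p1.1 (B1, p1.2);
          if p2.2 then pvA_loop nc nr lc east 0 (p1.1, p2.1) else (p1.1, p2.1)) = (S1, B1)
    rw [pv_eastPass_noop nc nr east (S1, false) hmem1]
    show (let p2 := pvA_southPass nc lc S1 (B1, false);
          if p2.2 then pvA_loop nc nr lc east 0 (S1, p2.1) else (S1, p2.1)) = (S1, B1)
    rw [pv_southPass_noop nc lc S1 (B1, false) hmem2]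
    rfl
  show (let p1 := pvA_eastPass nc nr east (s0, false);
        let p2 := pvA_southPass nc lc p1.1 (PySem.Set.empty, p1.2);
        if p2.2 then pvA_loop nc nr lc east 1 (p1.1, p2.1) else (p1.1, p2.1)) = (S1, B1)
  show (if P2.2 then pvA_loop nc nr lc east 1 (P1.1, P2.1) else (P1.1, P2.1)) = (S1, B1)
  rw [h1, hb2]
  by_cases hc : P2.2
  · rw [if_pos hc, hloop1]
  · rw [if_neg hc]


lemma pv_eastA (nc sr sc : Int) (eE : Bool) :
    (if eE then (PySem.List.pyRange sc nc 1).foldl (fun s c => PySem.Set.add s (sr * nc + c)) PySem.Set.empty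
     else PySem.Set.empty)
      = (if eE then PySem.Set.ofList ((PySem.List.pyRange sc nc 1).map (fun c => sr * nc + c)) else PySem.Set.empty) := by
  cases eE
  · rfl
  · simp only [if_pos]
    rw [pv_foldl_add_map, pv_update_empty]

lemma pv_southA0 (nc nr sr sc : Int) (eS : Bool) :
    (if eS then (PySem.List.pyRange sr nr 1).foldl (fun s r => PySem.Set.add s (r * nc + sc)) PySem.Set.empty
     else PySem.Set.empty)
      = (if eS then PySem.Set.ofList (pvColL nc nr sr sc) else PySem.Set.empty) := by
  cases eS
  · rfl
  · simp only [if_pos]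
    rw [pv_foldl_add_map, pv_update_empty]
    rfl

lemma pv_southA (nc nr sr sc : Int) (hsc : pvInCol nc sc) (eE eS : Bool) :
    PySem.Set.update (if eS then PySem.Set.ofList (pvColL nc nr sr sc) else PySem.Set.empty)
        ((if eE then PySem.Set.ofList ((PySem.List.pyRange sc nc 1).map (fun c => sr * nc + c))
          else PySem.Set.empty).flatMap (pvEGen nc nr))
      = PySem.Set.ofList (pvSG nc nr sr sc eE eS) := by
  have hbase : (if eS then PySem.Set.ofList (pvColL nc nr sr sc) else PySem.Set.empty)
      = PySem.Set.ofList (if eS then pvColL nc nr sr sc else []) := by cases eS <;> rfl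
  rw [hbase]
  cases eE
  · show PySem.Set.update (PySem.Set.ofList (if eS = true then pvColL nc nr sr sc else []))
        (List.flatMap (pvEGen nc nr) []) = _
    rw [List.flatMap_nil]
    show PySem.Set.ofList (if eS = true then pvColL nc nr sr sc else [])
        = PySem.Set.ofList ((if eS = true then pvColL nc nr sr sc else []) ++ [])
    rw [List.append_nil]
  · show PySem.Set.update (PySem.Set.ofList (if eS = true then pvColL nc nr sr sc else []))
        ((PySem.Set.ofList ((PySem.List.pyRange sc nc 1).map (fun c => sr * nc + c))).flatMap (pvEGen nc nr))
      = PySem.Set.ofList (pvSG nc nr sr sc true eS)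
    rw [pv_east_list, pv_flatMap_east nc nr sr sc hsc, pv_ofList_update]
    rfl

lemma pv_back (nc nr sr sc lc : Int) (hnc : nc ≠ 0) (hsc : pvInCol nc sc) (eE eS : Bool) :
    PySem.Set.update PySem.Set.empty ((PySem.Set.ofList (pvSG nc nr sr sc eE eS)).flatMap (pvSGen nc lc))
      = (if ((if eS then [sc] else [])
              ++ (if eE then (PySem.List.pyRange sc nc 1).filter (fun c => c != 0) else [])).contains lc
         then PySem.Set.ofList (pvBackL nc nr sr lc) else PySem.Set.empty) := by
  rw [pv_update_empty, pv_flatMap_sgen, pv_ofList_filter, pv_SG_filter nc nr sr sc lc hsc]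
  have hX1 : (if eS then (if sc = lc then pvBlockF nc nr sr lc else []) else [])
      = (if (eS = true ∧ sc = lc) then pvBlockF nc nr sr lc else []) := by
    cases eS <;> by_cases h : sc = lc <;> simp [h]
  have hX2 : (if eE then (if lc ∈ PySem.List.pyRange sc nc 1 ∧ lc ≠ 0 then pvBlockF nc nr sr lc else []) else [])
      = (if (eE = true ∧ lc ∈ PySem.List.pyRange sc nc 1 ∧ lc ≠ 0) then pvBlockF nc nr sr lc else []) := by
    cases eE <;> by_cases h : lc ∈ PySem.List.pyRange sc nc 1 ∧ lc ≠ 0 <;> simp [h]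
  rw [hX1, hX2]
  have hcont : (((if eS then [sc] else [])
        ++ (if eE then (PySem.List.pyRange sc nc 1).filter (fun c => c != 0) else [])).contains lc = true)
      ↔ ((eS = true ∧ sc = lc) ∨ (eE = true ∧ lc ∈ PySem.List.pyRange sc nc 1 ∧ lc ≠ 0)) := by
    have m1 : lc ∈ (if eS then [sc] else []) ↔ (eS = true ∧ sc = lc) := by
      cases eS
      · simp
      · simp only [if_pos, List.mem_singleton, true_and]
        exact eq_comm
    have m2 : lc ∈ (if eE then (PySem.List.pyRange sc nc 1).filter (fun c => c != 0) else [])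
        ↔ (eE = true ∧ lc ∈ PySem.List.pyRange sc nc 1 ∧ lc ≠ 0) := by
      cases eE
      · simp
      · simp only [if_pos, List.mem_filter, bne_iff_ne, true_and]
    rw [List.contains_iff_mem, List.mem_append, m1, m2]
  by_cases hC : (eS = true ∧ sc = lc) ∨ (eE = true ∧ lc ∈ PySem.List.pyRange sc nc 1 ∧ lc ≠ 0)
  · have hlc : pvInCol nc lc := by
      rcases hC with h | h
      · exact h.2 ▸ hsc
      · exact pv_incol_mem nc sc lc hsc h.2.1
    have hXX : PySem.Set.ofList
        ((if (eS = true ∧ sc = lc) then pvBlockF nc nr sr lc else [])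
          ++ (if (eE = true ∧ lc ∈ PySem.List.pyRange sc nc 1 ∧ lc ≠ 0) then pvBlockF nc nr sr lc else []))
        = pvBlockF nc nr sr lc := by
      have hself : PySem.Set.ofList (pvBlockF nc nr sr lc) = pvBlockF nc nr sr lc :=
        PySem.Set.ofList_eq_self_of_nodup _ (pv_blockF_nodup nc nr sr lc hnc)
      by_cases h1 : eS = true ∧ sc = lc <;> by_cases h2 : eE = true ∧ lc ∈ PySem.List.pyRange sc nc 1 ∧ lc ≠ 0
      · rw [if_pos h1, if_pos h2, ← pv_update_empty, pv_update_append, pv_update_empty, hself,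
          pv_update_noop _ _ (fun x hx => hx)]
      · rw [if_pos h1, if_neg h2, List.append_nil, hself]
      · rw [if_neg h1, if_pos h2, List.nil_append, hself]
      · exact absurd hC (by tauto)
    rw [hXX, if_pos (hcont.mpr hC), pv_blockF_flatMap nc nr sr lc hlc]
  · rw [if_neg (fun h => hC (hcont.mp h))]
    have h1 : ¬ (eS = true ∧ sc = lc) := fun h => hC (Or.inl h)
    have h2 : ¬ (eE = true ∧ lc ∈ PySem.List.pyRange sc nc 1 ∧ lc ≠ 0) := fun h => hC (Or.inr h)
    rw [if_neg h1, if_neg h2, List.nil_append]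
    rfl

lemma pv_core (spe nc nr : Int) (eE eS : Bool) (hnc : nc ≠ 0) :
    ungated_receivers_py spe nc nr eE eS = ungated_receivers_py_alt spe nc nr eE eS := by
  have hsc : pvInCol nc (PySem.Int.mod spe nc) := by
    rcases lt_or_gt_of_ne hnc with h | h
    · exact Or.inr ⟨h, (PySem.Int.mod_neg_bounds spe h).1, (PySem.Int.mod_neg_bounds spe h).2⟩
    · exact Or.inl ⟨h, PySem.Int.mod_nonneg spe h, PySem.Int.mod_lt spe h⟩
  simp only [ungated_receivers_py, ungated_receivers_py_alt]
  set sr := PySem.Int.floordiv spe nc with hsr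
  set sc := PySem.Int.mod spe nc with hscd
  rw [pv_eastA nc sr sc eE, pv_southA0 nc nr sr sc eS, pv_loop2,
    pv_southA nc nr sr sc hsc eE eS, pv_back nc nr sr sc (nc - 1) hnc hsc eE eS,
    pv_colsB_flatMap nc nr sr sc eE eS]
  rfl

-- ===== VERDICT (by name: the statement is the Claim_ definition above) =====
theorem ungated_receivers_py_spec : Claim_equal_ungated_receivers_py := by
  intro spe num_cols num_rows emits_east_flag emits_south_flag _ hpre
  exact pv_core spe num_cols num_rows emits_east_flag emits_south_flag hpre
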